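-- pv_equiv track=rewrite | github.com/meke-ops/mcp-router | internal/setup.py | _remove_codex_server_block
-- ===== SOURCE A (Python) =====
-- def _remove_codex_server_block(raw_text: str, server_name: str) -> str:
--     if not raw_text.strip():
--         return ""
--     server_prefix = f"[mcp_servers.{server_name}"
--     lines = raw_text.splitlines()
--     kept: list[str] = []
--     skipping = False
--     for line in lines:
--         stripped = line.strip()
--         if stripped.startswith("[") and stripped.endswith("]"):
--             if stripped.startswith(server_prefix):
--                 skipping = True
--                 continue
--             if skipping:
--                 skipping = False
--         if not skipping:
--             kept.append(line)
--     cleaned = "\n".join(kept).strip("\n")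
--     return f"{cleaned}\n" if cleaned else ""
-- ===== SOURCE B (Python) =====
-- def _remove_codex_server_block(raw_text: str, server_name: str) -> str:
--     if not raw_text.strip():
--         return ""
--     server_prefix = f"[mcp_servers.{server_name}"
--
--     def is_header(line: str) -> bool:
--         s = line.strip()
--         return s.startswith("[") and s.endswith("]")
--
--     blocks: list[list[str]] = [[]]
--     for line in raw_text.splitlines():
--         if is_header(line):
--             blocks.append([line])
--         else:
--             blocks[-1].append(line)
--     kept_blocks = [
--         b for b in blocks
--         if not (b and is_header(b[0]) and b[0].strip().startswith(server_prefix))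
--     ]
--     cleaned = "\n".join(line for b in kept_blocks for line in b).strip("\n")
--     return f"{cleaned}\n" if cleaned else ""
-- ===== Notes on version B (the rewrite author's own statement) =====
-- stated objective: alternative
-- what changed: Replaced the line-by-line skipping state machine with a group-then-filter decomposition: lines are partitioned into header-led blocks, blocks whose header matches the server prefix are filtered out, and the survivors are flattened.
import Mathlib
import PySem

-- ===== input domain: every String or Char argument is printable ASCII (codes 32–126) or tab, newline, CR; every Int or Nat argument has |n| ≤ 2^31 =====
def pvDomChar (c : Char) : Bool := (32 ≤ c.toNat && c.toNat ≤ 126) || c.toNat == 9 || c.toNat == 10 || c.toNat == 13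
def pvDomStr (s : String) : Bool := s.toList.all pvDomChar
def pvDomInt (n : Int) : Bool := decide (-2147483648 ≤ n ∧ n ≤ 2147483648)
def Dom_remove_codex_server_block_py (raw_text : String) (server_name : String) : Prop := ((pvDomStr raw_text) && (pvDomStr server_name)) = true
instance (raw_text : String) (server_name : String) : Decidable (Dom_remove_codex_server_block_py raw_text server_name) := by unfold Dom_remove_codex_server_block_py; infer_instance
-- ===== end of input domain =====

-- B regroups the lines into header-led blocks and filters whole blocks, instead of A's skipping flag (alternative decomposition, same cost).

-- ===== PORT A =====
-- literal port of A's loop: state (kept, skipping)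
def remove_codex_server_block_py (raw_text : String) (server_name : String) : String :=
  if PySem.Str.strip raw_text = "" then ""
  else
    let server_prefix := "[mcp_servers." ++ server_name
    let lines := PySem.Str.splitlines raw_text
    let st := lines.foldl (fun (st : List String × Bool) line =>
      let stripped := PySem.Str.strip line
      if PySem.Str.startswith stripped "[" && PySem.Str.endswith stripped "]" then
        if PySem.Str.startswith stripped server_prefix then (st.1, true)
        else (st.1 ++ [line], false)
      else if st.2 then st else (st.1 ++ [line], st.2)) ([], false)
    let cleaned := PySem.Str.stripChars (PySem.Str.join "\n" st.1) "\n"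
    if cleaned ≠ "" then cleaned ++ "\n" else ""

-- ===== PORT B =====
-- B-side helper: Python's 'b and is_header(b[0]) and b[0].strip().startswith(server_prefix)'
def pvBlockIsServer (isH m : String → Bool) (b : List String) : Bool :=
  match b with
  | [] => false
  | h :: _ => isH h && m h

-- literal port of B: group lines into blocks (done blocks, current block), filter blocks, flatten
def remove_codex_server_block_py_alt (raw_text : String) (server_name : String) : String :=
  if PySem.Str.strip raw_text = "" then ""
  else
    let server_prefix := "[mcp_servers." ++ server_name
    let isHeader := fun (line : String) =>
      PySem.Str.startswith (PySem.Str.strip line) "[" &&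
      PySem.Str.endswith (PySem.Str.strip line) "]"
    let st := (PySem.Str.splitlines raw_text).foldl
      (fun (st : List (List String) × List String) line =>
        if isHeader line then (st.1 ++ [st.2], [line]) else (st.1, st.2 ++ [line]))
      ([], [])
    let blocks := st.1 ++ [st.2]
    let keptBlocks := blocks.filter (fun b =>
      !pvBlockIsServer isHeader
        (fun h => PySem.Str.startswith (PySem.Str.strip h) server_prefix) b)
    let cleaned := PySem.Str.stripChars (PySem.Str.join "\n" keptBlocks.flatten) "\n"
    if cleaned ≠ "" then cleaned ++ "\n" else ""

-- ===== PRECONDITION & SPEC =====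
def Spec_remove_codex_server_block_py (raw_text : String) (server_name : String) (out : String) : Prop := out = remove_codex_server_block_py_alt raw_text server_name
instance (raw_text : String) (server_name : String) (out : String) : Decidable (Spec_remove_codex_server_block_py raw_text server_name out) := by unfold Spec_remove_codex_server_block_py; infer_instance

-- ===== CLAIM (what is proved, stated in full; the proofs are below) =====
def Claim_equal_remove_codex_server_block_py : Prop := ∀ (raw_text : String) (server_name : String), Dom_remove_codex_server_block_py raw_text server_name → Spec_remove_codex_server_block_py raw_text server_name (remove_codex_server_block_py raw_text server_name)

-- ===== LEMMAS AND PROOFS =====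

-- A's loop as a function of the remaining lines and the skipping flag
def pvAkept (isH m : String → Bool) : List String → Bool → List String
  | [], _ => []
  | l :: ls, sk =>
    if isH l then
      if m l then pvAkept isH m ls true
      else l :: pvAkept isH m ls false
    else if sk then pvAkept isH m ls sk else l :: pvAkept isH m ls sk

-- B's grouping as a function of the remaining lines and the current block
def pvBblocks (isH : String → Bool) : List String → List String → List (List String)
  | [], cur => [cur]
  | l :: ls, cur => if isH l then cur :: pvBblocks isH ls [l] else pvBblocks isH ls (cur ++ [l])

theorem pvA_foldl (isH m : String → Bool) (ls : List String) (kept : List String) (sk : Bool) :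
    (ls.foldl (fun (st : List String × Bool) line =>
      if isH line then
        if m line then (st.1, true) else (st.1 ++ [line], false)
      else if st.2 then st else (st.1 ++ [line], st.2)) (kept, sk)).1
    = kept ++ pvAkept isH m ls sk := by
  induction ls generalizing kept sk with
  | nil => simp [pvAkept]
  | cons l ls ih =>
    simp only [List.foldl_cons, pvAkept]
    by_cases h1 : isH l = true
    · by_cases h2 : m l = true
      · simp [h1, h2, ih]
      · simp [h1, h2, ih]
    · simp only [Bool.not_eq_true] at h1
      cases sk with
      | false => simp [h1, ih]
      | true => simp [h1, ih]

theorem pvB_foldl (isH : String → Bool) (ls : List String) (done : List (List String)) (cur : List String) :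
    (let st := ls.foldl (fun (st : List (List String) × List String) line =>
        if isH line then (st.1 ++ [st.2], [line]) else (st.1, st.2 ++ [line])) (done, cur)
     st.1 ++ [st.2])
    = done ++ pvBblocks isH ls cur := by
  induction ls generalizing done cur with
  | nil => simp [pvBblocks]
  | cons l ls ih =>
    simp only [List.foldl_cons, pvBblocks]
    by_cases h1 : isH l = true
    · simp [h1, ih]
    · simp [h1, ih]

theorem pvDrop_append_nonheader (isH m : String → Bool) (cur : List String) (l : String)
    (hl : isH l = false) : pvBlockIsServer isH m (cur ++ [l]) = pvBlockIsServer isH m cur := by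
  cases cur with
  | nil => simp [pvBlockIsServer, hl]
  | cons h t => simp [pvBlockIsServer]

theorem pvMain (isH m : String → Bool) (ls : List String) (cur : List String) :
    ((pvBblocks isH ls cur).filter (fun b => !pvBlockIsServer isH m b)).flatten
    = (if pvBlockIsServer isH m cur then [] else cur) ++ pvAkept isH m ls (pvBlockIsServer isH m cur) := by
  induction ls generalizing cur with
  | nil =>
    simp only [pvBblocks, pvAkept, List.filter]
    by_cases h : pvBlockIsServer isH m cur = true
    · simp [h]
    · simp only [Bool.not_eq_true] at h; simp [h]
  | cons l ls ih =>
    simp only [pvBblocks, pvAkept]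
    by_cases h1 : isH l = true
    · have hk : pvBlockIsServer isH m [l] = m l := by simp [pvBlockIsServer, h1]
      by_cases h2 : m l = true
      · by_cases hc : pvBlockIsServer isH m cur = true
        · simp [h1, h2, hc, hk, ih]
        · simp only [Bool.not_eq_true] at hc
          simp [h1, h2, hc, hk, ih]
      · simp only [Bool.not_eq_true] at h2
        by_cases hc : pvBlockIsServer isH m cur = true
        · simp [h1, h2, hc, hk, ih]
        · simp only [Bool.not_eq_true] at hc
          simp [h1, h2, hc, hk, ih]
    · simp only [Bool.not_eq_true] at h1
      by_cases hc : pvBlockIsServer isH m cur = true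
      · simp [h1, hc, ih, pvDrop_append_nonheader isH m cur l h1]
      · simp only [Bool.not_eq_true] at hc
        simp [h1, hc, ih, pvDrop_append_nonheader isH m cur l h1]

theorem pvKept_eq (isH m : String → Bool) (ls : List String) :
    (ls.foldl (fun (st : List String × Bool) line =>
      if isH line then
        if m line then (st.1, true) else (st.1 ++ [line], false)
      else if st.2 then st else (st.1 ++ [line], st.2)) ([], false)).1
    = ((let st := ls.foldl (fun (st : List (List String) × List String) line =>
          if isH line then (st.1 ++ [st.2], [line]) else (st.1, st.2 ++ [line])) ([], [])
        st.1 ++ [st.2]).filter (fun b => !pvBlockIsServer isH m b)).flatten := by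
  rw [pvA_foldl, pvB_foldl]
  have h0 : pvBlockIsServer isH m [] = false := rfl
  simp [pvMain, h0]

-- ===== VERDICT (by name: the statement is the Claim_ definition above) =====
theorem remove_codex_server_block_py_spec : Claim_equal_remove_codex_server_block_py := by
  intro raw_text server_name _
  unfold Spec_remove_codex_server_block_py remove_codex_server_block_py remove_codex_server_block_py_alt
  by_cases hempty : PySem.Str.strip raw_text = ""
  · simp [hempty]
  · simp only [hempty]
    have := pvKept_eq
      (fun line => PySem.Str.startswith (PySem.Str.strip line) "[" &&
                   PySem.Str.endswith (PySem.Str.strip line) "]")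
      (fun line => PySem.Str.startswith (PySem.Str.strip line) ("[mcp_servers." ++ server_name))
      (PySem.Str.splitlines raw_text)
    rw [this]
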